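-- pv_equiv track=rewrite | github.com/Midhilesh4890/Leetcode-Problems | Google/unique_paths.py | count_segment_paths
-- ===== SOURCE A (Python) =====
-- def count_segment_paths(n, start, end):
--     """
--     Count the number of paths from 'start' to 'end' in an n x m grid (only considering
--     the columns between start and end) using the allowed moves.
--
--     Both 'start' and 'end' are tuples (r, c). We assume that end[1] >= start[1].
--     """
--     (r_start, c_start) = start
--     (r_end, c_end) = end
--     if c_end < c_start:
--         # Cannot move left.
--         return 0
--     # The number of columns in this segment (inclusive of start and end columns).
--     width = c_end - c_start + 1
--     # dp[i][r] will be the number of ways to reach row r at the i-th column of the segment.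
--     dp = [[0 for _ in range(n)] for _ in range(width)]
--     dp[0][r_start] = 1
--
--     # Process each column in the segment.
--     for i in range(width - 1):
--         for r in range(n):
--             if dp[i][r]:
--                 for dr in [0, 1, -1]:
--                     nr = r + dr
--                     if 0 <= nr < n:
--                         dp[i+1][nr] += dp[i][r]
--     # The answer for this segment is the number of ways to get to row r_end at the last column.
--     return dp[width - 1][r_end]
-- ===== SOURCE B (Python) =====
-- def count_segment_paths(n, start, end):
--     """Method of images: embed the start row antisymmetrically on the cycle
--     Z/(2n+2) and iterate the unconstrained cyclic 3-term convolution; the wall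
--     constraints are enforced algebraically by the odd symmetry, and the answer
--     is the signed mass at the end row's site."""
--     (r_start, c_start) = start
--     (r_end, c_end) = end
--     if c_end < c_start:
--         return 0
--     L = 2 * (n + 1)
--     c = [0] * L
--     c[1 + r_start % n] = 1
--     c[L - 1 - r_start % n] = -1
--     for _ in range(c_end - c_start):
--         c = [c[j - 1] + c[j] + c[(j + 1) % L] for j in range(L)]
--     return c[1 + r_end % n]
-- ===== Notes on version B (the rewrite author's own statement) =====
-- stated objective: alternative
-- what changed: Replaced the walled 2-D DP table (push-style += into the next column under boundary checks and a nonzero guard) by the method of images: the start row is embedded antisymmetrically on the cycle Z/(2n+2) and one unconditional cyclic 3-term convolution vector is iterated; the wall constraints are enforced by the odd symmetry and the answer is the signed coefficient at the end row's site.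
import Mathlib
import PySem

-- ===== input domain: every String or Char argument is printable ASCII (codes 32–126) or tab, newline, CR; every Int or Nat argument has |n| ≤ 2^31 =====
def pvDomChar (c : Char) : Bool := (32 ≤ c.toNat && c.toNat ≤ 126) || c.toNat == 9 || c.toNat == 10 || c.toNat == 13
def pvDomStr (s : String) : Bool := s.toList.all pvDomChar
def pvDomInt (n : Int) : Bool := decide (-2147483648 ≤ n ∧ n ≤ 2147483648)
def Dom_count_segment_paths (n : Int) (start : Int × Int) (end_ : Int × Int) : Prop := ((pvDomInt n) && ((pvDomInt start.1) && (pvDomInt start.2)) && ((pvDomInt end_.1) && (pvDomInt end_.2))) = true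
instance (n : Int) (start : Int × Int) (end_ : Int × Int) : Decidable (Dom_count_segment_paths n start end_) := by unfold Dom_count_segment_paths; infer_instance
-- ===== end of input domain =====

-- B replaces A's walled column-by-column DP table by the method of images: the
-- start row is embedded antisymmetrically on the cycle Z/(2n+2) and an
-- unconditional cyclic 3-term convolution is iterated; objective: alternative algorithm.


-- ===== PORT A =====
def count_segment_paths (n : Int) (start : Int × Int) (end_ : Int × Int) : Int :=
  match start, end_ with
  | (r_start, c_start), (r_end, c_end) =>
    if c_end < c_start then 0
    else
      let width := c_end - c_start + 1
      let dp : List (List Int) :=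
        (PySem.List.pyRange 0 width 1).map (fun _ =>
          (PySem.List.pyRange 0 n 1).map (fun _ => (0 : Int)))
      let dp := PySem.List.pySetD dp 0 (PySem.List.pySetD (PySem.List.pyGetD dp 0 []) r_start 1)
      let dp := (PySem.List.pyRange 0 (width - 1) 1).foldl (fun dp i =>
        (PySem.List.pyRange 0 n 1).foldl (fun dp r =>
          if PySem.List.pyGetD (PySem.List.pyGetD dp i []) r 0 ≠ 0 then
            ([0, 1, -1] : List Int).foldl (fun dp dr =>
              let nr := r + dr
              if 0 ≤ nr ∧ nr < n then
                PySem.List.pySetD dp (i + 1)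
                  (PySem.List.pySetD (PySem.List.pyGetD dp (i + 1) []) nr
                    (PySem.List.pyGetD (PySem.List.pyGetD dp (i + 1) []) nr 0 +
                     PySem.List.pyGetD (PySem.List.pyGetD dp i []) r 0))
              else dp) dp
          else dp) dp) dp
      PySem.List.pyGetD (PySem.List.pyGetD dp (width - 1) []) r_end 0

-- ===== PORT B =====
def count_segment_paths_alt (n : Int) (start : Int × Int) (end_ : Int × Int) : Int :=
  match start, end_ with
  | (r_start, c_start), (r_end, c_end) =>
    if c_end < c_start then 0
    else
      let L := 2 * (n + 1)
      let c : List Int := List.replicate L.toNat 0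
      let c := PySem.List.pySetD c (1 + PySem.Int.mod r_start n) 1
      let c := PySem.List.pySetD c (L - 1 - PySem.Int.mod r_start n) (-1)
      let c := (PySem.List.pyRange 0 (c_end - c_start) 1).foldl (fun c _ =>
        (PySem.List.pyRange 0 L 1).map (fun j =>
          PySem.List.pyGetD c (j - 1) 0 + PySem.List.pyGetD c j 0 +
          PySem.List.pyGetD c (PySem.Int.mod (j + 1) L) 0)) c
      PySem.List.pyGetD c (1 + PySem.Int.mod r_end n) 0

-- ===== PRECONDITION & SPEC =====
-- Pre_ excludes exactly the inputs on which the Python A raises IndexError: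
-- when c_end >= c_start, A indexes dp[0][r_start] and dp[width-1][r_end] into rows of
-- length n, so it raises unless n >= 1 and both row indices are Python-valid (-n <= r < n).
def Pre_count_segment_paths (n : Int) (start : Int × Int) (end_ : Int × Int) : Prop :=
  end_.2 < start.2 ∨ (1 ≤ n ∧ -n ≤ start.1 ∧ start.1 < n ∧ -n ≤ end_.1 ∧ end_.1 < n)
instance (n : Int) (start : Int × Int) (end_ : Int × Int) : Decidable (Pre_count_segment_paths n start end_) := by unfold Pre_count_segment_paths; infer_instance

def pvWitness_count_segment_paths : Int × (Int × Int) × (Int × Int) := (3, (0, 0), (2, 2))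

def Spec_count_segment_paths (n : Int) (start : Int × Int) (end_ : Int × Int) (out : Int) : Prop := out = count_segment_paths_alt n start end_
instance (n : Int) (start : Int × Int) (end_ : Int × Int) (out : Int) : Decidable (Spec_count_segment_paths n start end_ out) := by unfold Spec_count_segment_paths; infer_instance

-- ===== CLAIM (what is proved, stated in full; the proofs are below) =====
def Claim_equal_count_segment_paths : Prop := ∀ (n : Int) (start : Int × Int) (end_ : Int × Int), Dom_count_segment_paths n start end_ → Pre_count_segment_paths n start end_ → Spec_count_segment_paths n start end_ (count_segment_paths n start end_)

-- ===== LEMMAS AND PROOFS =====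

theorem pvRangeN (n : Int) :
    PySem.List.pyRange 0 n 1 = List.map (fun k : Nat => (k : Int)) (List.range n.toNat) := by
  rcases (by omega : 0 ≤ n ∨ n < 0) with h | h
  · have hn : n = (n.toNat : Int) := by omega
    have := PySem.List.pyRange_zero_natCast n.toNat
    rw [← hn] at this
    exact this
  · have h2 : n.toNat = 0 := by omega
    rw [h2, List.range_zero, List.map_nil, List.eq_nil_iff_forall_not_mem]
    intro x hx
    rw [PySem.List.mem_pyRange_one] at hx
    omega

theorem pvGetD_set {α : Type} (b : List α) (m j : Nat) (v d : α) :
    (b.set m v).getD j d = if j = m ∧ m < b.length then v else b.getD j d := by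
  rcases Nat.lt_or_ge j b.length with h | h
  · rw [List.getD_eq_getElem _ _ (by simpa using h), List.getD_eq_getElem _ _ h,
      List.getElem_set]
    split_ifs <;> first | rfl | omega
  · rw [List.getD_eq_default _ _ (by simpa using h), List.getD_eq_default _ _ h]
    split_ifs with hc
    · omega
    · rfl

theorem pvSetD_wrap {α : Type} (xs : List α) (i : Int) (v : α) (m : Nat)
    (h1 : -(xs.length : Int) ≤ i) (h2 : i < 0) (hm : (m : Int) = xs.length + i) :
    PySem.List.pySetD xs i v = xs.set m v := by
  unfold PySem.List.pySetD PySem.List.pySet? PySem.List.pyIdx?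
  rw [if_neg (by omega), if_pos (by omega)]
  simp only [Option.map_some, Option.getD_some]
  congr 1
  omega

theorem pvGetD_wrap {α : Type} (xs : List α) (i : Int) (d : α) (m : Nat)
    (h1 : -(xs.length : Int) ≤ i) (h2 : i < 0) (hm : (m : Int) = xs.length + i) :
    PySem.List.pyGetD xs i d = xs.getD m d := by
  have e : i = -(((-i).toNat : Nat) : Int) := by omega
  have hmm : m = xs.length - (-i).toNat := by omega
  subst hmm
  conv_lhs => rw [e]
  rw [PySem.List.pyGetD_neg_natCast xs ((-i).toNat) d (by omega) (by omega)]
  rw [List.getD_eq_getElem _ _ (by omega)]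

def pvAddTri (n : Int) (a b : List Int) (r : Int) : List Int :=
  ([0, 1, -1] : List Int).foldl (fun b dr =>
    let nr := r + dr
    if 0 ≤ nr ∧ nr < n then
      PySem.List.pySetD b nr (PySem.List.pyGetD b nr 0 + PySem.List.pyGetD a r 0)
    else b) b

def pvG (n : Int) (a : List Int) (b : List Int) (r : Int) : List Int :=
  if PySem.List.pyGetD a r 0 ≠ 0 then pvAddTri n a b r else b

def pvStep (n : Int) (v : List Int) : List Int :=
  (List.range n.toNat).map (fun j =>
    (if 1 ≤ j ∧ j - 1 < n.toNat then v.getD (j-1) 0 else 0)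
    + (if j < n.toNat then v.getD j 0 else 0)
    + (if j + 1 < n.toNat then v.getD (j+1) 0 else 0))

theorem pvAddTri_length (n : Int) (a b : List Int) (r : Int) :
    (pvAddTri n a b r).length = b.length := by
  unfold pvAddTri
  simp only [List.foldl]
  split_ifs <;> simp [PySem.List.length_pySetD]

theorem pvAddTri_getD (n : Int) (a b : List Int) (r j : Nat)
    (hn : (b.length : Int) = n) (hr : r < b.length) (hj : j < b.length) :
    (pvAddTri n a b ↑r).getD j 0 =
      b.getD j 0 + (if j = r ∨ j = r + 1 ∨ j + 1 = r then PySem.List.pyGetD a ↑r 0 else 0) := by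
  unfold pvAddTri
  simp only [List.foldl, add_zero]
  rw [if_pos (by omega : (0 ≤ (r:Int) ∧ (r:Int) < n))]
  split_ifs with h1 h2 h3 h4 h5 h6 h7
  all_goals try have hm1 : (0:Int) ≤ ↑r + -1 := by omega
  all_goals
    try simp only [PySem.List.pySetD_of_nonneg _ _ hm1, PySem.List.pyGetD_of_nonneg _ _ hm1]
  all_goals
    simp only [PySem.List.pySetD_of_nonneg _ _ (by omega : (0:Int) ≤ ((r:Nat) : Int)),
      PySem.List.pySetD_of_nonneg _ _ (by omega : (0:Int) ≤ ((r:Nat) : Int) + 1),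
      PySem.List.pyGetD_of_nonneg _ _ (by omega : (0:Int) ≤ ((r:Nat) : Int)),
      PySem.List.pyGetD_of_nonneg _ _ (by omega : (0:Int) ≤ ((r:Nat) : Int) + 1)]
  all_goals
    simp only [(by omega : (((r:Nat) : Int)).toNat = r),
      (by omega : (((r:Nat) : Int) + 1).toNat = r + 1),
      (by omega : (((r:Nat) : Int) + -1).toNat = r - 1)]
  all_goals simp only [pvGetD_set, List.length_set]
  all_goals split_ifs <;> first | rfl | omega | (congr 2 <;> omega)

theorem pvG_length (n : Int) (a b : List Int) (r : Int) :
    (pvG n a b r).length = b.length := by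
  unfold pvG
  split_ifs
  · exact pvAddTri_length n a b r
  · rfl

theorem pvInner (n : Int) (a : List Int) (k : Nat) (b : List Int)
    (ha : a.length = n.toNat) (hb : b.length = n.toNat) (hk : k ≤ n.toNat) :
    (((List.range k).map (fun t : Nat => (t : Int))).foldl (pvG n a) b).length = n.toNat ∧
    ∀ j, j < n.toNat →
      (((List.range k).map (fun t : Nat => (t : Int))).foldl (pvG n a) b).getD j 0 =
        b.getD j 0 + (if 1 ≤ j ∧ j - 1 < k then a.getD (j - 1) 0 else 0)
          + (if j < k then a.getD j 0 else 0) + (if j + 1 < k then a.getD (j + 1) 0 else 0) := by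
  induction k with
  | zero => simp [hb]
  | succ k ih =>
    obtain ⟨ihlen, ihget⟩ := ih (by omega)
    rw [List.range_succ, List.map_append, List.foldl_append]
    simp only [List.map_cons, List.map_nil, List.foldl_cons, List.foldl_nil]
    set C := ((List.range k).map (fun t : Nat => (t : Int))).foldl (pvG n a) b with hC
    constructor
    · rw [pvG_length, ihlen]
    · intro j hj
      have hD1 : ∀ v : Int, (if j = k ∨ j = k + 1 ∨ j + 1 = k then v else 0) =
          (if j = k then v else 0) + (if j = k + 1 then v else 0) +
            (if j + 1 = k then v else 0) := by
        intro v
        split_ifs <;> first | ring1 | (exfalso; omega)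
      by_cases hz : PySem.List.pyGetD a (↑k) 0 = 0
      case neg =>
        have hG : pvG n a C ↑k = pvAddTri n a C ↑k := by unfold pvG; rw [if_pos hz]
        rw [hG, pvAddTri_getD n a C k j (by omega) (by omega) (by omega), ihget j hj]
        rw [PySem.List.pyGetD_natCast, hD1]
        have E1 : (if 1 ≤ j ∧ j - 1 < k then a.getD (j - 1) 0 else 0) +
            (if j = k + 1 then a.getD k 0 else 0) =
            (if 1 ≤ j ∧ j - 1 < k + 1 then a.getD (j - 1) 0 else 0) := by
          by_cases e : j = k + 1
          · subst e
            simp only [Nat.add_sub_cancel]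
            split_ifs <;> first | ring1 | (exfalso; omega)
          · rw [if_neg e]
            split_ifs <;> first | ring1 | (exfalso; omega)
        have E2 : (if j < k then a.getD j 0 else 0) + (if j = k then a.getD k 0 else 0) =
            (if j < k + 1 then a.getD j 0 else 0) := by
          by_cases e : j = k
          · subst e
            split_ifs <;> first | ring1 | (exfalso; omega)
          · rw [if_neg e]
            split_ifs <;> first | ring1 | (exfalso; omega)
        have E3 : (if j + 1 < k then a.getD (j + 1) 0 else 0) +
            (if j + 1 = k then a.getD k 0 else 0) =
            (if j + 1 < k + 1 then a.getD (j + 1) 0 else 0) := by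
          by_cases e : j + 1 = k
          · rw [← e]
            split_ifs <;> first | ring1 | (exfalso; omega)
          · rw [if_neg e]
            split_ifs <;> first | ring1 | (exfalso; omega)
        linear_combination E1 + E2 + E3
      case pos =>
        have hG : pvG n a C ↑k = C := by unfold pvG; rw [if_neg (by simp [hz])]
        rw [hG, ihget j hj]
        have hz' : a.getD k 0 = 0 := by rwa [PySem.List.pyGetD_natCast] at hz
        have E1 : (if 1 ≤ j ∧ j - 1 < k then a.getD (j - 1) 0 else 0) =
            (if 1 ≤ j ∧ j - 1 < k + 1 then a.getD (j - 1) 0 else 0) := by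
          split_ifs with p q
          · rfl
          · exfalso; omega
          · have e : j - 1 = k := by omega
            rw [e, hz']
          · rfl
        have E2 : (if j < k then a.getD j 0 else 0) = (if j < k + 1 then a.getD j 0 else 0) := by
          split_ifs with p q
          · rfl
          · exfalso; omega
          · have e : j = k := by omega
            rw [e, hz']
          · rfl
        have E3 : (if j + 1 < k then a.getD (j + 1) 0 else 0) =
            (if j + 1 < k + 1 then a.getD (j + 1) 0 else 0) := by
          split_ifs with p q
          · rfl
          · exfalso; omega
          · have e : j + 1 = k := by omega
            rw [e, hz']
          · rfl
        rw [E1, E2, E3]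

theorem pvListEq (N : Nat) (x y : List Int) (hx : x.length = N) (hy : y.length = N)
    (h : ∀ j, j < N → x.getD j 0 = y.getD j 0) : x = y := by
  apply List.ext_getElem (by omega)
  intro i h1 h2
  have := h i (by omega)
  rwa [List.getD_eq_getElem _ _ h1, List.getD_eq_getElem _ _ h2] at this

theorem pvStep_length (n : Int) (v : List Int) : (pvStep n v).length = n.toNat := by
  unfold pvStep
  simp

theorem pvStep_getD (n : Int) (v : List Int) (j : Nat) (hj : j < n.toNat) :
    (pvStep n v).getD j 0 =
      (if 1 ≤ j ∧ j - 1 < n.toNat then v.getD (j-1) 0 else 0)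
      + (if j < n.toNat then v.getD j 0 else 0)
      + (if j + 1 < n.toNat then v.getD (j+1) 0 else 0) := by
  unfold pvStep
  rw [List.getD_eq_getElem _ _ (by simpa using hj), List.getElem_map, List.getElem_range]

theorem pvInnerStep (n : Int) (a : List Int) (ha : a.length = n.toNat) :
    (PySem.List.pyRange 0 n 1).foldl (pvG n a) (List.replicate n.toNat (0:Int)) = pvStep n a := by
  rw [pvRangeN]
  obtain ⟨hlen, hget⟩ := pvInner n a n.toNat (List.replicate n.toNat (0:Int)) ha
    (by simp) (le_refl _)
  apply pvListEq n.toNat _ _ hlen (pvStep_length n a)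
  intro j hj
  rw [hget j hj, pvStep_getD n a j hj]
  have hz : (List.replicate n.toNat (0:Int)).getD j 0 = 0 := by
    rw [List.getD_eq_getElem _ _ (by simpa using hj)]
    simp
  rw [hz]
  ring1

def pvF (n : Int) (i : Int) (dp : List (List Int)) (r : Int) : List (List Int) :=
  if PySem.List.pyGetD (PySem.List.pyGetD dp i []) r 0 ≠ 0 then
    ([0, 1, -1] : List Int).foldl (fun dp dr =>
      let nr := r + dr
      if 0 ≤ nr ∧ nr < n then
        PySem.List.pySetD dp (i + 1)
          (PySem.List.pySetD (PySem.List.pyGetD dp (i + 1) []) nr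
            (PySem.List.pyGetD (PySem.List.pyGetD dp (i + 1) []) nr 0 +
             PySem.List.pyGetD (PySem.List.pyGetD dp i []) r 0))
      else dp) dp
  else dp

theorem pvF_factor (n : Int) (i : Nat) (dp : List (List Int)) (r : Int)
    (hi : i + 1 < dp.length) :
    pvF n ↑i dp r =
      PySem.List.pySetD dp ((i:Int) + 1) (pvG n (dp.getD i []) (dp.getD (i + 1) []) r) := by
  have e : ((i:Int) + 1) = ((i + 1 : Nat) : Int) := by push_cast; ring
  have hset : ∀ x, PySem.List.pySetD dp ((i:Int) + 1) x = dp.set (i + 1) x := by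
    intro x
    rw [e, PySem.List.pySetD_natCast]
  have hne : (i = i + 1) ↔ False := iff_false_intro (by omega)
  have hread : ∀ x : List Int, (dp.set (i + 1) x).getD (i + 1) [] = x := by
    intro x
    rw [pvGetD_set]
    simp [hi]
  have hread2 : ∀ x : List Int, (dp.set (i + 1) x).getD i [] = dp.getD i [] := by
    intro x
    rw [pvGetD_set]
    simp [hne]
  unfold pvF pvG pvAddTri
  simp only [List.foldl, e, PySem.List.pySetD_natCast, PySem.List.pyGetD_natCast]
  split_ifs <;>
    (try simp only [List.set_set, hread, hread2]) <;>
    first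
    | rfl | (exfalso; omega)
    | (rw [List.getD_eq_getElem _ _ (by omega : i + 1 < dp.length)]
       exact (List.set_getElem_self (by omega)).symm)

theorem pvFfold (n : Int) (i : Nat) (l : List Int) :
    ∀ dp : List (List Int), i + 1 < dp.length →
      l.foldl (pvF n ↑i) dp =
        PySem.List.pySetD dp ((i:Int) + 1)
          (l.foldl (pvG n (dp.getD i [])) (dp.getD (i + 1) [])) := by
  have e : ((i:Int) + 1) = ((i + 1 : Nat) : Int) := by push_cast; ring
  induction l with
  | nil =>
    intro dp hi
    simp only [List.foldl_nil]
    rw [e, PySem.List.pySetD_natCast, List.getD_eq_getElem _ _ hi]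
    exact (List.set_getElem_self hi).symm
  | cons r t ih =>
    intro dp hi
    rw [List.foldl_cons, List.foldl_cons, pvF_factor n i dp r hi]
    rw [ih _ (by rw [e, PySem.List.pySetD_natCast, List.length_set]; exact hi)]
    rw [e, PySem.List.pySetD_natCast, PySem.List.pySetD_natCast, PySem.List.pySetD_natCast]
    rw [List.set_set]
    have h1 : (dp.set (i + 1) (pvG n (dp.getD i []) (dp.getD (i + 1) []) r)).getD i [] =
        dp.getD i [] := by
      rw [pvGetD_set, if_neg (by omega)]
    have h2 : (dp.set (i + 1) (pvG n (dp.getD i []) (dp.getD (i + 1) []) r)).getD (i + 1) [] =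
        pvG n (dp.getD i []) (dp.getD (i + 1) []) r := by
      rw [pvGetD_set, if_pos ⟨rfl, hi⟩]
    rw [h1, h2]

theorem pvIterLen (n : Int) (v0 : List Int) (h : v0.length = n.toNat) (t : Nat) :
    ((pvStep n)^[t] v0).length = n.toNat := by
  induction t with
  | zero => simpa using h
  | succ t ih =>
    rw [Function.iterate_succ_apply', pvStep_length]

theorem pvOuter (n : Int) (v0 : List Int) (hv : v0.length = n.toNat) (w : Nat) :
    ∀ k, k ≤ w →
      ((List.range k).map (fun t : Nat => (t : Int))).foldl
        (fun dp i => (PySem.List.pyRange 0 n 1).foldl (pvF n i) dp)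
        (v0 :: List.replicate w (List.replicate n.toNat 0)) =
      (List.range (k + 1)).map (fun t => (pvStep n)^[t] v0) ++
        List.replicate (w - k) (List.replicate n.toNat 0) := by
  intro k
  induction k with
  | zero =>
    intro _
    simp [List.range_one]
  | succ k ih =>
    intro hk
    rw [List.range_succ, List.map_append, List.foldl_append, ih (by omega)]
    simp only [List.map_cons, List.map_nil, List.foldl_cons, List.foldl_nil]
    set T := (List.range (k + 1)).map (fun t => (pvStep n)^[t] v0) ++
      List.replicate (w - k) (List.replicate n.toNat 0) with hT
    have hTlen : T.length = w + 1 := by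
      rw [hT]
      simp
      omega
    have ha : T.getD k [] = (pvStep n)^[k] v0 := by
      rw [hT, List.getD_append _ _ _ _ (by simp), List.getD_eq_getElem _ _ (by simp),
        List.getElem_map, List.getElem_range]
    have hb : T.getD (k + 1) [] = List.replicate n.toNat 0 := by
      rw [hT, List.getD_append_right _ _ _ _ (by simp)]
      simp only [List.length_map, List.length_range, Nat.sub_self]
      rw [List.getD_eq_getElem _ _ (by simp only [List.length_replicate]; omega)]
      rw [List.getElem_replicate]
    rw [pvFfold n k (PySem.List.pyRange 0 n 1) T (by omega), ha, hb]
    rw [pvInnerStep n _ (pvIterLen n v0 hv k)]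
    have e : ((k:Int) + 1) = ((k + 1 : Nat) : Int) := by push_cast; ring
    rw [e, PySem.List.pySetD_natCast, hT]
    rw [List.set_append_right _ _ (by simp)]
    simp only [List.length_map, List.length_range, Nat.sub_self]
    have hrep : List.replicate (w - k) (List.replicate n.toNat (0:Int)) =
        List.replicate n.toNat (0:Int) :: List.replicate (w - (k + 1)) (List.replicate n.toNat 0) := by
      have : w - k = (w - (k + 1)) + 1 := by omega
      rw [this, List.replicate_succ]
    rw [hrep]
    simp only [List.set_cons_zero]
    have hms : (List.range (k + 1 + 1)).map (fun t => (pvStep n)^[t] v0) =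
        (List.range (k + 1)).map (fun t => (pvStep n)^[t] v0) ++
          [pvStep n ((pvStep n)^[k] v0)] := by
      rw [List.range_succ, List.map_append, List.map_cons, List.map_nil,
        Function.iterate_succ_apply']
    rw [hms, List.append_assoc, List.singleton_append]

theorem pvA_iter (n rs cs re ce : Int) (hlt : ¬ ce < cs) :
    count_segment_paths n (rs, cs) (re, ce) =
      PySem.List.pyGetD ((pvStep n)^[(ce - cs).toNat]
        (PySem.List.pySetD (List.replicate n.toNat 0) rs 1)) re 0 := by
  unfold count_segment_paths
  simp only [if_neg hlt]
  set N := n.toNat with hN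
  set w := (ce - cs).toNat with hw
  set z : List Int := List.replicate N 0 with hz
  set v0 : List Int := PySem.List.pySetD z rs 1 with hv0
  have hv0len : v0.length = N := by
    rw [hv0, PySem.List.length_pySetD, hz, List.length_replicate]
  have einit : (PySem.List.pyRange 0 (ce - cs + 1) 1).map (fun _ =>
      (PySem.List.pyRange 0 n 1).map (fun _ => (0:Int))) = List.replicate (w + 1) z := by
    rw [pvRangeN, pvRangeN, List.map_map, List.map_map]
    have h1 : (ce - cs + 1).toNat = w + 1 := by omega
    rw [h1]
    simp only [Function.comp_def]
    rw [List.map_const', List.map_const']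
    simp [hz, hN]
  show PySem.List.pyGetD
      (PySem.List.pyGetD
        ((PySem.List.pyRange 0 (ce - cs + 1 - 1) 1).foldl
          (fun dp i => (PySem.List.pyRange 0 n 1).foldl (pvF n i) dp)
          (PySem.List.pySetD
            ((PySem.List.pyRange 0 (ce - cs + 1) 1).map (fun _ =>
              (PySem.List.pyRange 0 n 1).map (fun _ => (0:Int)))) 0
            (PySem.List.pySetD
              (PySem.List.pyGetD
                ((PySem.List.pyRange 0 (ce - cs + 1) 1).map (fun _ =>
                  (PySem.List.pyRange 0 n 1).map (fun _ => (0:Int)))) 0 [])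
              rs 1)))
        (ce - cs + 1 - 1) [])
      re 0 =
    PySem.List.pyGetD ((pvStep n)^[w] v0) re 0
  rw [einit]
  have hget0 : PySem.List.pyGetD (List.replicate (w + 1) z) 0 [] = z := by
    rw [PySem.List.pyGetD_zero]
    simp
  rw [hget0]
  have hset0 : PySem.List.pySetD (List.replicate (w + 1) z) 0 v0 =
      v0 :: List.replicate w z := by
    rw [PySem.List.pySetD_of_nonneg _ _ (le_refl 0), List.replicate_succ]
    simp
  rw [hset0]
  have hr1 : ce - cs + 1 - 1 = ((w : Nat) : Int) := by omega
  have hrw : PySem.List.pyRange 0 ((w : Nat) : Int) 1 =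
      (List.range w).map (fun k : Nat => (k : Int)) := by
    rw [pvRangeN, Int.toNat_natCast]
  rw [hr1, hrw]
  rw [pvOuter n v0 hv0len w w (le_refl w)]
  simp only [Nat.sub_self, List.replicate_zero, List.append_nil]
  have hread : PySem.List.pyGetD
      ((List.range (w + 1)).map (fun t => (pvStep n)^[t] v0)) ((w : Nat) : Int) [] =
      (pvStep n)^[w] v0 := by
    rw [PySem.List.pyGetD_natCast, List.getD_eq_getElem _ _ (by simp),
      List.getElem_map, List.getElem_range]
  rw [hread]

theorem pvReadIdx {α : Type} (xs : List α) (i : Int) (d : α) (N : Nat) (hlen : xs.length = N)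
    (h1 : -(N:Int) ≤ i) (h2 : i < N) :
    PySem.List.pyGetD xs i d = xs.getD ((if i < 0 then (N:Int) + i else i).toNat) d := by
  subst hlen
  by_cases hneg : i < 0
  · rw [pvGetD_wrap xs i d ((if i < 0 then (xs.length:Int) + i else i).toNat) (by omega) hneg
      (by rw [if_pos hneg]; omega)]
  · rw [PySem.List.pyGetD_of_nonneg _ _ (by omega), if_neg hneg]

theorem pvSetIdx {α : Type} (xs : List α) (i : Int) (v : α) (N : Nat) (hlen : xs.length = N)
    (h1 : -(N:Int) ≤ i) (h2 : i < N) :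
    PySem.List.pySetD xs i v = xs.set ((if i < 0 then (N:Int) + i else i).toNat) v := by
  subst hlen
  by_cases hneg : i < 0
  · rw [pvSetD_wrap xs i v ((if i < 0 then (xs.length:Int) + i else i).toNat) (by omega) hneg
      (by rw [if_pos hneg]; omega)]
  · rw [PySem.List.pySetD_of_nonneg _ _ (by omega), if_neg hneg]

-- the cyclic convolution step B iterates (B's inner comprehension)
def pvCyc (n : Int) (c : List Int) : List Int :=
  (PySem.List.pyRange 0 (2 * (n + 1)) 1).map (fun j =>
    PySem.List.pyGetD c (j - 1) 0 + PySem.List.pyGetD c j 0 +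
    PySem.List.pyGetD c (PySem.Int.mod (j + 1) (2 * (n + 1))) 0)

theorem pvBfold {α : Type} (g : α → α) (l : List Int) :
    ∀ c : α, l.foldl (fun c _ => g c) c = g^[l.length] c := by
  induction l with
  | nil => intro c; rfl
  | cons x t ih =>
    intro c
    rw [List.foldl_cons, List.length_cons, ih, Function.iterate_succ_apply]

-- cyclic predecessor / successor / mirror on {0, …, 2n+1}
def pvPred (n : Int) (j : Nat) : Nat := if j = 0 then 2*n.toNat+1 else j - 1
def pvSucc (n : Int) (j : Nat) : Nat := if j = 2*n.toNat+1 then 0 else j + 1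
def pvMir (n : Int) (j : Nat) : Nat := if j = 0 then 0 else 2*n.toNat+2 - j

theorem pvMir_lt (n : Int) (j : Nat) (h : j < 2*n.toNat+2) : pvMir n j < 2*n.toNat+2 := by
  unfold pvMir; split_ifs <;> omega

theorem pvPred_lt (n : Int) (j : Nat) (h : j < 2*n.toNat+2) : pvPred n j < 2*n.toNat+2 := by
  unfold pvPred; split_ifs <;> omega

theorem pvSucc_lt (n : Int) (j : Nat) (h : j < 2*n.toNat+2) : pvSucc n j < 2*n.toNat+2 := by
  unfold pvSucc; split_ifs <;> omega

theorem pvMirPred (n : Int) (j : Nat) (h : j < 2*n.toNat+2) :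
    pvMir n (pvPred n j) = pvSucc n (pvMir n j) := by
  unfold pvMir pvPred pvSucc; split_ifs <;> first | contradiction | omega

theorem pvMirSucc (n : Int) (j : Nat) (h : j < 2*n.toNat+2) :
    pvMir n (pvSucc n j) = pvPred n (pvMir n j) := by
  unfold pvMir pvPred pvSucc; split_ifs <;> first | contradiction | omega

theorem pvModSmall (n : Int) (j : Nat) (hn : 1 ≤ n) (hj : (j:Int) < 2*(n+1)) :
    PySem.Int.mod (j:Int) (2*(n+1)) = (j:Int) := by
  rw [PySem.Int.mod_eq_emod_of_pos (by omega)]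
  exact Int.emod_eq_of_lt (by omega) hj

theorem pvCyc_length (n : Int) (c : List Int) (hn : 1 ≤ n) :
    (pvCyc n c).length = 2*n.toNat+2 := by
  unfold pvCyc
  rw [pvRangeN]
  simp
  omega

-- entry formula for the cyclic step
theorem pvCyc_getD (n : Int) (c : List Int) (hn : 1 ≤ n)
    (hc : c.length = 2*n.toNat+2) (j : Nat) (hj : j < 2*n.toNat+2) :
    (pvCyc n c).getD j 0 =
      c.getD (pvPred n j) 0 + c.getD j 0 + c.getD (pvSucc n j) 0 := by
  have hLN : (2*(n+1)).toNat = 2*n.toNat+2 := by omega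
  unfold pvCyc
  rw [pvRangeN, hLN, List.map_map]
  rw [PySem.List.getD_map_range _ _ _ _ hj]
  simp only [Function.comp_apply]
  have hmid : PySem.List.pyGetD c (↑j) 0 = c.getD j 0 := PySem.List.pyGetD_natCast c j 0
  have hleft : PySem.List.pyGetD c ((j:Int) - 1) 0 = c.getD (pvPred n j) 0 := by
    unfold pvPred
    by_cases h0 : j = 0
    · subst h0
      rw [if_pos rfl]
      exact pvGetD_wrap c (((0:Nat):Int) - 1) 0 (2*n.toNat+1)
        (by rw [hc]; push_cast; omega) (by omega) (by rw [hc]; push_cast; omega)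
    · rw [if_neg h0]
      rw [PySem.List.pyGetD_of_nonneg _ _ (by omega)]
      congr 1
      omega
  have hright : PySem.List.pyGetD c (PySem.Int.mod ((j:Int) + 1) (2*(n+1))) 0 =
      c.getD (pvSucc n j) 0 := by
    unfold pvSucc
    by_cases hL : j = 2*n.toNat+1
    · subst hL
      rw [if_pos rfl]
      have : PySem.Int.mod ((2*n.toNat+1 : Nat) + 1 : Int) (2*(n+1)) = 0 := by
        rw [PySem.Int.mod_eq_emod_of_pos (by omega)]
        rw [show ((2*n.toNat+1 : Nat) + 1 : Int) = 2*(n+1) by omega]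
        exact Int.emod_self
      rw [this]
      exact PySem.List.pyGetD_zero c 0
    · rw [if_neg hL]
      rw [show ((j:Int) + 1) = (((j+1 : Nat)) : Int) by omega]
      rw [pvModSmall n (j+1) hn (by omega)]
      exact PySem.List.pyGetD_natCast c (j+1) 0
  rw [hleft, hmid, hright]

-- the method-of-images invariant: c is the odd extension of v to the cycle
def pvInv (n : Int) (c v : List Int) : Prop :=
  c.length = 2*n.toNat+2 ∧ v.length = n.toNat ∧
  (∀ r, r < n.toNat → c.getD (r+1) 0 = v.getD r 0) ∧
  (∀ j, j < 2*n.toNat+2 → c.getD (pvMir n j) 0 = -(c.getD j 0))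

theorem pvInv_step (n : Int) (c v : List Int) (hn : 1 ≤ n) (h : pvInv n c v) :
    pvInv n (pvCyc n c) (pvStep n v) := by
  obtain ⟨hc, hv, hmatch, hodd⟩ := h
  have hzero : c.getD 0 0 = 0 := by
    have := hodd 0 (by omega)
    unfold pvMir at this
    rw [if_pos rfl] at this
    omega
  have hN1 : c.getD (n.toNat+1) 0 = 0 := by
    have := hodd (n.toNat+1) (by omega)
    unfold pvMir at this
    rw [if_neg (by omega), show 2*n.toNat+2 - (n.toNat+1) = n.toNat+1 by omega] at this
    omega
  refine ⟨pvCyc_length n c hn, pvStep_length n v, ?_, ?_⟩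
  · intro r hr
    rw [pvCyc_getD n c hn hc (r+1) (by omega), pvStep_getD n v r hr]
    have hpred : pvPred n (r+1) = r := by unfold pvPred; rw [if_neg (by omega)]; omega
    have hsucc : pvSucc n (r+1) = r+2 := by unfold pvSucc; rw [if_neg (by omega)]
    rw [hpred, hsucc]
    have hA : c.getD r 0 = (if 1 ≤ r ∧ r - 1 < n.toNat then v.getD (r-1) 0 else 0) := by
      by_cases h0 : r = 0
      · subst h0
        rw [hzero, if_neg (by omega)]
      · rw [if_pos (by omega)]
        have := hmatch (r-1) (by omega)
        rw [show r - 1 + 1 = r by omega] at this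
        exact this
    have hB : c.getD (r+1) 0 = (if r < n.toNat then v.getD r 0 else 0) := by
      rw [if_pos hr]
      exact hmatch r hr
    have hC : c.getD (r+2) 0 = (if r + 1 < n.toNat then v.getD (r+1) 0 else 0) := by
      by_cases hrn : r + 1 < n.toNat
      · rw [if_pos hrn]
        have := hmatch (r+1) hrn
        rw [show r + 1 + 1 = r + 2 by omega] at this
        exact this
      · rw [if_neg hrn]
        rw [show r + 2 = n.toNat + 1 by omega]
        exact hN1
    rw [hA, hB, hC]
  · intro j hj
    rw [pvCyc_getD n c hn hc (pvMir n j) (pvMir_lt n j hj),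
        pvCyc_getD n c hn hc j hj]
    rw [← pvMirSucc n j hj, ← pvMirPred n j hj]
    rw [hodd (pvSucc n j) (pvSucc_lt n j hj), hodd j hj,
        hodd (pvPred n j) (pvPred_lt n j hj)]
    ring

theorem pvInv_iter (n : Int) (c v : List Int) (hn : 1 ≤ n) (h : pvInv n c v) (t : Nat) :
    pvInv n ((pvCyc n)^[t] c) ((pvStep n)^[t] v) := by
  induction t with
  | zero => exact h
  | succ t ih =>
    rw [Function.iterate_succ_apply', Function.iterate_succ_apply']
    exact pvInv_step n _ _ hn ih

theorem pvModWrap (n i : Int) (hn : 1 ≤ n) (h1 : -n ≤ i) (h2 : i < n) :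
    PySem.Int.mod i n = ((((if i < 0 then (n.toNat:Int) + i else i)).toNat : Nat) : Int) := by
  rw [PySem.Int.mod_eq_emod_of_pos (by omega)]
  by_cases hneg : i < 0
  · rw [if_pos hneg]
    have : i % n = (i + n) % n := by
      conv_rhs => rw [Int.add_emod_right]
    rw [this, Int.emod_eq_of_lt (by omega) (by omega)]
    omega
  · rw [if_neg hneg, Int.emod_eq_of_lt (by omega) h2]
    omega

theorem pvMain (n rs cs re ce : Int) (hlt : ¬ ce < cs) (hn : 1 ≤ n)
    (hrs1 : -n ≤ rs) (hrs2 : rs < n) (hre1 : -n ≤ re) (hre2 : re < n) :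
    count_segment_paths n (rs, cs) (re, ce) = count_segment_paths_alt n (rs, cs) (re, ce) := by
  have hN : ((n.toNat : Nat) : Int) = n := by omega
  set N := n.toNat with hNdef
  set w := (ce - cs).toNat with hw
  set rsI : Nat := ((if rs < 0 then (N:Int) + rs else rs)).toNat with hrsId
  set reI : Nat := ((if re < 0 then (N:Int) + re else re)).toNat with hreId
  have hrsIN : rsI < N := by rw [hrsId]; split_ifs <;> omega
  have hreIN : reI < N := by rw [hreId]; split_ifs <;> omega
  -- A's result
  rw [pvA_iter n rs cs re ce hlt]
  rw [pvSetIdx (List.replicate N (0:Int)) rs 1 N (by simp) (by omega) (by omega)]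
  set v0 : List Int := (List.replicate N (0:Int)).set rsI 1 with hv0d
  have hv0len : v0.length = N := by rw [hv0d]; simp
  have hlenIter := pvIterLen n v0 hv0len w
  rw [pvReadIdx ((pvStep n)^[w] v0) re 0 N hlenIter (by omega) (by omega)]
  -- B's result
  unfold count_segment_paths_alt
  show ((pvStep n)^[w] v0).getD reI 0 = (if ce < cs then (0:Int) else
    PySem.List.pyGetD
      ((PySem.List.pyRange 0 (ce - cs) 1).foldl (fun c _ => pvCyc n c)
        (PySem.List.pySetD
          (PySem.List.pySetD (List.replicate (2*(n+1)).toNat 0) (1 + PySem.Int.mod rs n) 1)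
          (2*(n+1) - 1 - PySem.Int.mod rs n) (-1)))
      (1 + PySem.Int.mod re n) 0)
  rw [if_neg hlt]
  have hLtoNat : (2*(n+1)).toNat = 2*N+2 := by omega
  have hrlen : (PySem.List.pyRange 0 (ce - cs) 1).length = w := by
    rw [pvRangeN]
    simp [hw]
  have hfold : ∀ cc : List Int,
      (PySem.List.pyRange 0 (ce - cs) 1).foldl (fun c _ => pvCyc n c) cc =
        (pvCyc n)^[w] cc := by
    intro cc
    rw [pvBfold (pvCyc n) _ cc, hrlen]
  rw [hfold]
  -- the initial cyclic vector
  have hmodrs := pvModWrap n rs hn hrs1 hrs2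
  have hmodre := pvModWrap n re hn hre1 hre2
  rw [← hNdef] at hmodrs hmodre
  set c0 : List Int :=
    ((List.replicate (2*N+2) (0:Int)).set (1+rsI) 1).set (2*N+1-rsI) (-1) with hc0d
  have hinit : PySem.List.pySetD
      (PySem.List.pySetD (List.replicate (2*(n+1)).toNat 0) (1 + PySem.Int.mod rs n) 1)
      (2*(n+1) - 1 - PySem.Int.mod rs n) (-1) = c0 := by
    rw [hLtoNat, hmodrs]
    rw [PySem.List.pySetD_of_nonneg _ _ (by omega), PySem.List.pySetD_of_nonneg _ _ (by omega)]
    rw [show ((1:Int) + ((rsI:Nat):Int)).toNat = 1 + rsI by omega]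
    rw [show ((2*(n+1) - 1 - ((rsI:Nat):Int))).toNat = 2*N+1-rsI by omega]
  rw [hinit]
  have hc0get : ∀ j : Nat, c0.getD j 0 =
      if j = 1+rsI then 1 else if j = 2*N+1-rsI then -1 else 0 := by
    intro j
    rw [hc0d, pvGetD_set, pvGetD_set]
    have hl1 : ((List.replicate (2*N+2) (0:Int)).set (1+rsI) 1).length = 2*N+2 := by simp
    have hrepl : (List.replicate (2*N+2) (0:Int)).getD j 0 = 0 := by
      by_cases hjl : j < 2*N+2
      · rw [List.getD_eq_getElem _ _ (by simpa using hjl), List.getElem_replicate]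
      · rw [List.getD_eq_default _ _ (by simpa using hjl)]
    rw [hl1]
    by_cases h2 : j = 2*N+1-rsI
    · rw [if_pos ⟨h2, by omega⟩, if_pos h2, if_neg (by omega)]
    · rw [if_neg (by simp [h2]), if_neg h2]
      by_cases h1 : j = 1+rsI
      · rw [if_pos ⟨h1, by rw [List.length_replicate]; omega⟩, if_pos h1]
      · rw [if_neg (by simp [h1]), if_neg h1, hrepl]
  have hInv0 : pvInv n c0 v0 := by
    refine ⟨by rw [hc0d]; simp; omega, hv0len, ?_, ?_⟩
    · intro r hr
      rw [hc0get (r+1), hv0d, pvGetD_set]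
      by_cases h1 : r = rsI
      · rw [if_pos (by omega), if_pos ⟨h1, by rw [List.length_replicate]; omega⟩]
      · rw [if_neg (by omega), if_neg (by omega), if_neg (by simp [h1])]
        by_cases hjl : r < N
        · rw [List.getD_eq_getElem _ _ (by simpa using hjl), List.getElem_replicate]
        · omega
    · intro j hj
      rw [hc0get, hc0get]
      unfold pvMir
      split_ifs <;> first | ring1 | omega
  have hInvW := pvInv_iter n c0 v0 hn hInv0 w
  obtain ⟨hcw, hvw, hmw, _⟩ := hInvW
  rw [hmodre]
  rw [show (1 + ((reI : Nat) : Int)) = (((1 + reI : Nat)) : Int) by omega]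
  rw [PySem.List.pyGetD_natCast]
  have := hmw reI hreIN
  rw [show reI + 1 = 1 + reI by omega] at this
  rw [this]

-- ===== VERDICT (by name: the statement is the Claim_ definition above) =====
theorem count_segment_paths_spec : Claim_equal_count_segment_paths := by
  intro n start end_ _ hpre
  obtain ⟨rs, cs⟩ := start
  obtain ⟨re, ce⟩ := end_
  unfold Spec_count_segment_paths
  by_cases hlt : ce < cs
  · unfold count_segment_paths count_segment_paths_alt
    simp only [if_pos hlt]
  · rcases hpre with h | ⟨hn, h1, h2, h3, h4⟩
    · exact absurd h hlt
    · exact pvMain n rs cs re ce hlt hn h1 h2 h3 h4
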